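-- pv_equiv track=rewrite | github.com/AkizaShyn/ludotheque | app/igdb.py | _expanded_platform_terms
-- ===== SOURCE A (Python) =====
-- def _normalize_platform_text(value: str) -> str:
--     return "".join(ch for ch in value.lower().strip() if ch.isalnum())
--
-- _PLATFORM_EQUIV: dict[str, set[str]] = {
--     "pc": {"pc", "windows", "microsoftwindows", "computer"},
--     "nes": {"nes", "nintendoentertainmentsystem", "famicom"},
--     "snes": {"snes", "supernintendo", "supernintendoentertainmentsystem"},
--     "megadrive": {"megadrive", "segagenesis", "genesis"},
--     "playstation": {"playstation", "ps1", "psx"},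
--     "playstation2": {"playstation2", "ps2"},
--     "playstation3": {"playstation3", "ps3"},
--     "playstation4": {"playstation4", "ps4"},
--     "playstation5": {"playstation5", "ps5"},
--     "xbox": {"xbox", "xboxclassic"},
--     "xbox360": {"xbox360"},
--     "xboxone": {"xboxone"},
--     "xboxseriesx": {"xboxseriesx", "xboxseriess", "xboxseriesxandseriess"},
--     "gameboyadvance": {"gameboyadvance", "gba"},
--     "nintendods": {"nintendods", "nds"},
--     "nintendoswitch": {"nintendoswitch", "switch"},
--     "wiiu": {"wiiu"},
--     "psvita": {"psvita", "vita"},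
-- }
--
-- def _expanded_platform_terms(value: str) -> set[str]:
--     normalized = _normalize_platform_text(value)
--     if not normalized:
--         return set()
--
--     terms = {normalized}
--     for canonical, aliases in _PLATFORM_EQUIV.items():
--         if normalized == canonical or normalized in aliases:
--             terms.add(canonical)
--             terms.update(aliases)
--     return terms
-- ===== SOURCE B (Python) =====
-- # B: a flat literal per-term group table (40 entries) looked up once per call replaces
-- # A's per-call scan over the 18 equivalence groups; normalization is an explicit
-- # accumulator loop instead of a generator expression.
--
-- def _normalize_platform_text(value: str) -> str:
--     out = []
--     for ch in value.lower().strip():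
--         if ch.isalnum():
--             out.append(ch)
--     return "".join(out)
--
-- _PC = ("pc", "windows", "microsoftwindows", "computer")
-- _NES = ("nes", "nintendoentertainmentsystem", "famicom")
-- _SNES = ("snes", "supernintendo", "supernintendoentertainmentsystem")
-- _MEGADRIVE = ("megadrive", "segagenesis", "genesis")
-- _PS1 = ("playstation", "ps1", "psx")
-- _PS2 = ("playstation2", "ps2")
-- _PS3 = ("playstation3", "ps3")
-- _PS4 = ("playstation4", "ps4")
-- _PS5 = ("playstation5", "ps5")
-- _XBOX = ("xbox", "xboxclassic")
-- _XBOX360 = ("xbox360",)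
-- _XBOXONE = ("xboxone",)
-- _XBOXSX = ("xboxseriesx", "xboxseriess", "xboxseriesxandseriess")
-- _GBA = ("gameboyadvance", "gba")
-- _NDS = ("nintendods", "nds")
-- _SWITCH = ("nintendoswitch", "switch")
-- _WIIU = ("wiiu",)
-- _PSVITA = ("psvita", "vita")
--
-- _GROUP_OF: dict[str, tuple[str, ...]] = {
--     "pc": _PC, "windows": _PC, "microsoftwindows": _PC, "computer": _PC,
--     "nes": _NES, "nintendoentertainmentsystem": _NES, "famicom": _NES,
--     "snes": _SNES, "supernintendo": _SNES, "supernintendoentertainmentsystem": _SNES,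
--     "megadrive": _MEGADRIVE, "segagenesis": _MEGADRIVE, "genesis": _MEGADRIVE,
--     "playstation": _PS1, "ps1": _PS1, "psx": _PS1,
--     "playstation2": _PS2, "ps2": _PS2,
--     "playstation3": _PS3, "ps3": _PS3,
--     "playstation4": _PS4, "ps4": _PS4,
--     "playstation5": _PS5, "ps5": _PS5,
--     "xbox": _XBOX, "xboxclassic": _XBOX,
--     "xbox360": _XBOX360,
--     "xboxone": _XBOXONE,
--     "xboxseriesx": _XBOXSX, "xboxseriess": _XBOXSX, "xboxseriesxandseriess": _XBOXSX,
--     "gameboyadvance": _GBA, "gba": _GBA,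
--     "nintendods": _NDS, "nds": _NDS,
--     "nintendoswitch": _SWITCH, "switch": _SWITCH,
--     "wiiu": _WIIU,
--     "psvita": _PSVITA, "vita": _PSVITA,
-- }
--
-- def _expanded_platform_terms(value: str) -> set[str]:
--     normalized = _normalize_platform_text(value)
--     if not normalized:
--         return set()
--     terms = {normalized}
--     terms.update(_GROUP_OF.get(normalized, ()))
--     return terms
-- ===== Notes on version B (the rewrite author's own statement) =====
-- stated objective: simpler
-- what changed: B replaces A's per-call scan over the 18 equivalence groups (with incremental set unioning per matching group) by a flat 40-entry term-to-group table looked up once, and replaces the generator-expression normalization by an explicit accumulator loop.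
import Mathlib
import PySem

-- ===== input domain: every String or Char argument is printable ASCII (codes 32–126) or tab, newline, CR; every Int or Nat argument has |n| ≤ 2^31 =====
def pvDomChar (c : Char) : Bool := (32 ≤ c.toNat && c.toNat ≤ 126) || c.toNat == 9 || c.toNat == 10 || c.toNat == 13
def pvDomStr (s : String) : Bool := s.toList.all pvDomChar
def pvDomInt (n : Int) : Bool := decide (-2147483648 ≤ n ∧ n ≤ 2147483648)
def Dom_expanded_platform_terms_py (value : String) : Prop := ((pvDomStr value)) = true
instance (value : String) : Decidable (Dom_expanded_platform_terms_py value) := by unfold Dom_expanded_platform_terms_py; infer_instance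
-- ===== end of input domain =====

-- B replaces A's per-call scan over the 18 equivalence groups by a flat literal 40-entry
-- term-to-group table looked up once, and uses an explicit accumulator loop for
-- normalization (objective: simpler; same results).

-- ===== PORT A =====
-- shared module helper _normalize_platform_text ("".join(ch for ch in value.lower().strip() if ch.isalnum()))
def normalizePlatformText (value : String) : String :=
  String.ofList ((PySem.Chars.strip (PySem.Chars.lower value.toList)).filter
    (fun ch => PySem.Chars.isalnum ch))

-- _PLATFORM_EQUIV: dict (insertion order) of canonical -> alias set (set literal, distinct elements in written order)
def platformEquiv : List (String × PySem.Set String) :=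
  [ ("pc", ["pc", "windows", "microsoftwindows", "computer"]),
    ("nes", ["nes", "nintendoentertainmentsystem", "famicom"]),
    ("snes", ["snes", "supernintendo", "supernintendoentertainmentsystem"]),
    ("megadrive", ["megadrive", "segagenesis", "genesis"]),
    ("playstation", ["playstation", "ps1", "psx"]),
    ("playstation2", ["playstation2", "ps2"]),
    ("playstation3", ["playstation3", "ps3"]),
    ("playstation4", ["playstation4", "ps4"]),
    ("playstation5", ["playstation5", "ps5"]),
    ("xbox", ["xbox", "xboxclassic"]),
    ("xbox360", ["xbox360"]),
    ("xboxone", ["xboxone"]),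
    ("xboxseriesx", ["xboxseriesx", "xboxseriess", "xboxseriesxandseriess"]),
    ("gameboyadvance", ["gameboyadvance", "gba"]),
    ("nintendods", ["nintendods", "nds"]),
    ("nintendoswitch", ["nintendoswitch", "switch"]),
    ("wiiu", ["wiiu"]),
    ("psvita", ["psvita", "vita"]) ]

def expanded_platform_terms_py (value : String) : List String :=
  let normalized := normalizePlatformText value
  if normalized = "" then PySem.Set.empty
  else
    let terms : PySem.Set String := PySem.Set.ofList [normalized]
    platformEquiv.foldl (fun terms cg =>
      if normalized = cg.1 ∨ normalized ∈ cg.2 then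
        PySem.Set.update (PySem.Set.add terms cg.1) cg.2
      else terms) terms

-- ===== PORT B =====
-- B's _normalize_platform_text: explicit accumulator loop over value.lower().strip()
def altNormalizePlatformText (value : String) : String :=
  String.ofList ((PySem.Chars.strip (PySem.Chars.lower value.toList)).foldl
    (fun out ch => if PySem.Chars.isalnum ch then out ++ [ch] else out) [])

-- the group tuples _PC … _PSVITA
def grpPC : List String := ["pc", "windows", "microsoftwindows", "computer"]
def grpNES : List String := ["nes", "nintendoentertainmentsystem", "famicom"]
def grpSNES : List String := ["snes", "supernintendo", "supernintendoentertainmentsystem"]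
def grpMD : List String := ["megadrive", "segagenesis", "genesis"]
def grpPS1 : List String := ["playstation", "ps1", "psx"]
def grpPS2 : List String := ["playstation2", "ps2"]
def grpPS3 : List String := ["playstation3", "ps3"]
def grpPS4 : List String := ["playstation4", "ps4"]
def grpPS5 : List String := ["playstation5", "ps5"]
def grpXBOX : List String := ["xbox", "xboxclassic"]
def grpX360 : List String := ["xbox360"]
def grpXONE : List String := ["xboxone"]
def grpXSX : List String := ["xboxseriesx", "xboxseriess", "xboxseriesxandseriess"]
def grpGBA : List String := ["gameboyadvance", "gba"]
def grpNDS : List String := ["nintendods", "nds"]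
def grpSWITCH : List String := ["nintendoswitch", "switch"]
def grpWIIU : List String := ["wiiu"]
def grpVITA : List String := ["psvita", "vita"]

-- _GROUP_OF: flat literal dict, every term -> its full group
def groupOf : PySem.Dict String (List String) :=
  PySem.Dict.mk
    [ ("pc", grpPC), ("windows", grpPC), ("microsoftwindows", grpPC), ("computer", grpPC),
      ("nes", grpNES), ("nintendoentertainmentsystem", grpNES), ("famicom", grpNES),
      ("snes", grpSNES), ("supernintendo", grpSNES), ("supernintendoentertainmentsystem", grpSNES),
      ("megadrive", grpMD), ("segagenesis", grpMD), ("genesis", grpMD),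
      ("playstation", grpPS1), ("ps1", grpPS1), ("psx", grpPS1),
      ("playstation2", grpPS2), ("ps2", grpPS2),
      ("playstation3", grpPS3), ("ps3", grpPS3),
      ("playstation4", grpPS4), ("ps4", grpPS4),
      ("playstation5", grpPS5), ("ps5", grpPS5),
      ("xbox", grpXBOX), ("xboxclassic", grpXBOX),
      ("xbox360", grpX360),
      ("xboxone", grpXONE),
      ("xboxseriesx", grpXSX), ("xboxseriess", grpXSX), ("xboxseriesxandseriess", grpXSX),
      ("gameboyadvance", grpGBA), ("gba", grpGBA),
      ("nintendods", grpNDS), ("nds", grpNDS),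
      ("nintendoswitch", grpSWITCH), ("switch", grpSWITCH),
      ("wiiu", grpWIIU),
      ("psvita", grpVITA), ("vita", grpVITA) ]

def expanded_platform_terms_py_alt (value : String) : List String :=
  let normalized := altNormalizePlatformText value
  if normalized = "" then PySem.Set.empty
  else PySem.Set.update (PySem.Set.ofList [normalized]) (groupOf.getD normalized [])

-- ===== PRECONDITION & SPEC =====
def Spec_expanded_platform_terms_py (value : String) (out : List String) : Prop := out = expanded_platform_terms_py_alt value
instance (value : String) (out : List String) : Decidable (Spec_expanded_platform_terms_py value out) := by unfold Spec_expanded_platform_terms_py; infer_instance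

-- ===== CLAIM (what is proved, stated in full; the proofs are below) =====
def Claim_equal_expanded_platform_terms_py : Prop := ∀ (value : String), Dom_expanded_platform_terms_py value → Spec_expanded_platform_terms_py value (expanded_platform_terms_py value)

-- ===== LEMMAS AND PROOFS =====

-- the two normalizations agree: B's append-loop is A's filter
theorem altNormalize_eq (value : String) :
    altNormalizePlatformText value = normalizePlatformText value := by
  unfold altNormalizePlatformText normalizePlatformText
  rw [PySem.List.foldl_append_if_eq_filter]
  simp

-- all 40 terms occurring anywhere in the table
def allTerms : List String :=
  ["pc", "windows", "microsoftwindows", "computer",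
   "nes", "nintendoentertainmentsystem", "famicom",
   "snes", "supernintendo", "supernintendoentertainmentsystem",
   "megadrive", "segagenesis", "genesis",
   "playstation", "ps1", "psx",
   "playstation2", "ps2", "playstation3", "ps3", "playstation4", "ps4", "playstation5", "ps5",
   "xbox", "xboxclassic", "xbox360", "xboxone",
   "xboxseriesx", "xboxseriess", "xboxseriesxandseriess",
   "gameboyadvance", "gba", "nintendods", "nds",
   "nintendoswitch", "switch", "wiiu", "psvita", "vita"]

-- A's loop leaves the accumulator unchanged when no group matches
theorem foldl_no_match (n : String) (l : List (String × PySem.Set String)) (acc : PySem.Set String)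
    (h : ∀ p ∈ l, ¬(n = p.1 ∨ n ∈ p.2)) :
    l.foldl (fun terms cg =>
      if n = cg.1 ∨ n ∈ cg.2 then PySem.Set.update (PySem.Set.add terms cg.1) cg.2
      else terms) acc = acc := by
  induction l generalizing acc with
  | nil => rfl
  | cons p t ih =>
    simp only [List.foldl_cons, if_neg (h p (List.mem_cons_self))]
    exact ih acc (fun q hq => h q (List.mem_cons_of_mem _ hq))

theorem getD_no_key (n : String) (items : List (String × List String))
    (h : ∀ p ∈ items, n ≠ p.1) :
    (PySem.Dict.mk items).getD n [] = [] := by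
  induction items with
  | nil => rfl
  | cons p t ih =>
    have hrest := ih (fun q hq => h q (List.mem_cons_of_mem _ hq))
    simp only [PySem.Dict.getD] at hrest ⊢
    rw [PySem.Dict.get?_mk_cons,
      if_neg (by simp [beq_eq_false_iff_ne.mpr (Ne.symm (h p List.mem_cons_self))])]
    exact hrest

-- every key of the flat table is one of the 40 terms
set_option maxRecDepth 20000 in
theorem groupOf_items : ∀ p ∈ groupOf.items, p.1 ∈ allTerms := by decide

set_option maxRecDepth 20000 in
theorem core_eq (n : String) :
    (if n = "" then PySem.Set.empty
     else
       platformEquiv.foldl (fun terms cg =>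
         if n = cg.1 ∨ n ∈ cg.2 then PySem.Set.update (PySem.Set.add terms cg.1) cg.2
         else terms) (PySem.Set.ofList [n]))
    = (if n = "" then PySem.Set.empty
       else PySem.Set.update (PySem.Set.ofList [n]) (groupOf.getD n [])) := by
  by_cases he : n = ""
  · simp [he]
  · simp only [if_neg he]
    by_cases hm : n ∈ allTerms
    · simp only [allTerms, List.mem_cons, List.not_mem_nil, or_false] at hm
      rcases hm with rfl|rfl|rfl|rfl|rfl|rfl|rfl|rfl|rfl|rfl|rfl|rfl|rfl|rfl|rfl|rfl|rfl|rfl|rfl|rfl|rfl|rfl|rfl|rfl|rfl|rfl|rfl|rfl|rfl|rfl|rfl|rfl|rfl|rfl|rfl|rfl|rfl|rfl|rfl|rfl <;> decide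
    · have hA : ∀ p ∈ platformEquiv, ¬(n = p.1 ∨ n ∈ p.2) := by
        intro p hp hc
        apply hm
        fin_cases hp <;> simp_all [allTerms]
      have hB : groupOf.getD n [] = [] :=
        getD_no_key n groupOf.items
          (fun p hp heq => hm (heq ▸ groupOf_items p hp))
      rw [foldl_no_match n platformEquiv _ hA]
      unfold groupOf at hB ⊢
      rw [hB]
      rfl

set_option maxHeartbeats 1000000 in
theorem expanded_platform_terms_py_eq (value : String) :
    expanded_platform_terms_py value = expanded_platform_terms_py_alt value := by
  unfold expanded_platform_terms_py expanded_platform_terms_py_alt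
  simp only [altNormalize_eq]
  exact core_eq (normalizePlatformText value)

-- ===== VERDICT (by name: the statement is the Claim_ definition above) =====
theorem expanded_platform_terms_py_spec : Claim_equal_expanded_platform_terms_py := by
  intro value _
  exact expanded_platform_terms_py_eq value
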